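-- pv_equiv track=rewrite | github.com/Mdominykas/lexicographicalFileNumerator | script.py | startingNumber
-- ===== SOURCE A (Python) =====
-- def startingNumber(fileName):
-- 	ans = 0
-- 	yra = 0
-- 	for element in range(0, len(fileName)):
-- 		x = fileName[element]
-- 		if '0'<=x and x<='9':
-- 			num = int(x)
-- 			ans *= 10
-- 			ans += num
-- 			yra = 1
-- 		else:
-- 			break;
-- 	return (ans, yra)
-- ===== SOURCE B (Python) =====
-- import re
--
-- def startingNumber(fileName):
-- 	m = re.match(r'[0-9]+', fileName)
-- 	if m is None:
-- 		return (0, 0)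
-- 	return (int(m.group()), 1)
-- ===== Notes on version B (the rewrite author's own statement) =====
-- stated objective: idiomatic
-- what changed: Replaces the index loop with per-digit accumulation by a single regex match of the leading [0-9]+ run converted with one int() call.
import Mathlib
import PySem

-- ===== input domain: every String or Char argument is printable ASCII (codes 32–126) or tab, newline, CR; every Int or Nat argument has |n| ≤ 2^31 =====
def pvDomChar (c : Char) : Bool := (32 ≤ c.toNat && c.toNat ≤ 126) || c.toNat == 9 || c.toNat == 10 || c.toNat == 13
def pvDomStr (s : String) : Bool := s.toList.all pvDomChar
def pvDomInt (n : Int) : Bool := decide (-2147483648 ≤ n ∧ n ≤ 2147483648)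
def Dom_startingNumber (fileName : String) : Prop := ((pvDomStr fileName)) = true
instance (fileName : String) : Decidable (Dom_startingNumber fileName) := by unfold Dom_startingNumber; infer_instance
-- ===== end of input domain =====

-- B replaces A's per-character accumulation loop with a regex match of the leading
-- digit run plus one int() conversion (idiomatic; return value identical).

-- ===== PORT A =====
-- A: loop over indices, accumulate ans = ans*10 + int(x) while digit, else break.
def startingNumberGoA : List Char → Int → Int → Int × Int
  | [], ans, yra => (ans, yra)
  | c :: cs, ans, yra =>
    if '0' ≤ c ∧ c ≤ '9' then
      startingNumberGoA cs (ans * 10 + (Int.ofNat c.toNat - 48)) 1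
    else (ans, yra)

def startingNumber (fileName : String) : Int × Int :=
  startingNumberGoA fileName.toList 0 0

-- ===== PORT B =====
-- B: re.match(r'[0-9]+', s) = longest leading digit run (takeWhile); int(group) is the
-- hand-ported base-10 conversion of that run (exact: the run is nonempty ASCII digits).
def startingNumberDigits (s : String) : List Char :=
  s.toList.takeWhile (fun c => decide ('0' ≤ c ∧ c ≤ '9'))

def startingNumber_alt (fileName : String) : Int × Int :=
  match startingNumberDigits fileName with
  | [] => (0, 0)
  | ds => (ds.foldl (fun a c => a * 10 + (Int.ofNat c.toNat - 48)) 0, 1)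

-- ===== PRECONDITION & SPEC =====
def Spec_startingNumber (fileName : String) (out : Int × Int) : Prop := out = startingNumber_alt fileName
instance (fileName : String) (out : Int × Int) : Decidable (Spec_startingNumber fileName out) := by unfold Spec_startingNumber; infer_instance

-- ===== CLAIM (what is proved, stated in full; the proofs are below) =====
def Claim_equal_startingNumber : Prop := ∀ (fileName : String), Dom_startingNumber fileName → Spec_startingNumber fileName (startingNumber fileName)

-- ===== LEMMAS AND PROOFS =====

-- once the flag yra is 1, A's loop is exactly a fold over the remaining digit prefix
theorem startingNumberGoA_one (cs : List Char) (ans : Int) :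
    startingNumberGoA cs ans 1 =
      ((cs.takeWhile (fun c => decide ('0' ≤ c ∧ c ≤ '9'))).foldl
        (fun a c => a * 10 + (Int.ofNat c.toNat - 48)) ans, 1) := by
  induction cs generalizing ans with
  | nil => simp [startingNumberGoA]
  | cons c cs ih =>
    by_cases h : '0' ≤ c ∧ c ≤ '9'
    · simp [startingNumberGoA, List.takeWhile, h, ih]
    · simp [startingNumberGoA, List.takeWhile, h]

-- ===== VERDICT (by name: the statement is the Claim_ definition above) =====
theorem startingNumber_spec : Claim_equal_startingNumber := by
  intro s _
  unfold Spec_startingNumber startingNumber startingNumber_alt startingNumberDigits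
  cases hl : s.toList with
  | nil => simp [startingNumberGoA]
  | cons c cs =>
    by_cases h : '0' ≤ c ∧ c ≤ '9'
    · simp [startingNumberGoA, List.takeWhile, h, startingNumberGoA_one]
    · simp [startingNumberGoA, List.takeWhile, h]
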